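-- pv_equiv track=rewrite | github.com/GLion31023/LeetCode | daily/oct_24/min_swaps_to_balance_string.py | min_swaps
-- ===== SOURCE A (Python) =====
-- def min_swaps(s: str) -> int:
--     swaps = 0
--     balance = 0
--
--     for c in s:
--         if c == '[':
--             balance -= 1
--         elif c == ']':
--             balance += 1
--
--         if balance > 0:
--             swaps += 1
--             balance -= 2
--
--     return swaps
-- ===== SOURCE B (Python) =====
-- def min_swaps(s: str) -> int:
--     # Stage 1: record every prefix depth (excess of ']' over '[') in a list.
--     depths = [0]
--     d = 0
--     for c in s:
--         d += 1 if c == ']' else -1 if c == '[' else 0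
--         depths.append(d)
--     # Stage 2: the answer is a closed form of the peak prefix depth.
--     return (max(depths) + 1) // 2
-- ===== Notes on version B (the rewrite author's own statement) =====
-- stated objective: alternative
-- what changed: B replaces A's greedy swap-and-reset simulation with two stages: it first materialises the list of all prefix depths (excess of ']' over '[', with 0 included so the max is clamped), then recovers the swap count by the closed form (max(depths) + 1) // 2.
import Mathlib
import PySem

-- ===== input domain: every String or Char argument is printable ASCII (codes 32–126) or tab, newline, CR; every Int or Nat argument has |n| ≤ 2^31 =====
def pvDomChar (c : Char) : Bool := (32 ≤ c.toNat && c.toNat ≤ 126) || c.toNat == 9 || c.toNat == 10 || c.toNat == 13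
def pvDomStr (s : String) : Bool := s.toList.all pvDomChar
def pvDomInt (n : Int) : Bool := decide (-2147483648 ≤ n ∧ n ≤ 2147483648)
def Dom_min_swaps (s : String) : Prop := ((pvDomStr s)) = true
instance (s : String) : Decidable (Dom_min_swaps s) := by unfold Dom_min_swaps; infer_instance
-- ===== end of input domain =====

-- B replaces A's greedy swap-and-reset simulation with a staged computation: the list of all
-- prefix depths is built first, and the answer is the closed form (max + 1) // 2 of its peak.


-- ===== PORT A =====
-- A: greedy simulation; whenever balance goes positive, count a swap and reset it by 2
def min_swaps (s : String) : Int :=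
  (s.toList.foldl (fun (st : Int × Int) c =>
    let balance := if c = '[' then st.2 - 1 else if c = ']' then st.2 + 1 else st.2
    if balance > 0 then (st.1 + 1, balance - 2) else (st.1, balance)) (0, 0)).1

-- ===== PORT B =====
-- B: stage 1 materialises the list of all prefix depths (the Python loop appending to `depths`
-- is exactly List.scanl); stage 2 takes its max (the list is never empty, it starts with 0,
-- so Python's max cannot raise and the `none` arm is unreachable) and applies the closed form.
def min_swaps_alt (s : String) : Int :=
  let depths := List.scanl
    (fun (d : Int) c => d + (if c = ']' then 1 else if c = '[' then -1 else 0)) 0 s.toList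
  match PySem.List.max? depths (fun x => x) with
  | some m => PySem.Int.floordiv (m + 1) 2
  | none => 0

-- ===== PRECONDITION & SPEC =====
def Spec_min_swaps (s : String) (out : Int) : Prop := out = min_swaps_alt s
instance (s : String) (out : Int) : Decidable (Spec_min_swaps s out) := by unfold Spec_min_swaps; infer_instance

-- ===== CLAIM (what is proved, stated in full; the proofs are below) =====
def Claim_equal_min_swaps : Prop := ∀ (s : String), Dom_min_swaps s → Spec_min_swaps s (min_swaps s)

-- ===== LEMMAS AND PROOFS =====

-- Loop invariant: running max over the scanl of depths determines A's swap count.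
theorem fold_inv (l : List Char) (sw b d p : Int)
    (h1 : b = d - 2 * sw) (h4 : max p d = 2 * sw ∨ max p d = 2 * sw - 1) :
    ((List.scanl (fun (d : Int) c => d + (if c = ']' then 1 else if c = '[' then -1 else 0)) d l).foldl max p
      = 2 * (l.foldl (fun (st : Int × Int) c =>
          let balance := if c = '[' then st.2 - 1 else if c = ']' then st.2 + 1 else st.2
          if balance > 0 then (st.1 + 1, balance - 2) else (st.1, balance)) (sw, b)).1) ∨
    ((List.scanl (fun (d : Int) c => d + (if c = ']' then 1 else if c = '[' then -1 else 0)) d l).foldl max p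
      = 2 * (l.foldl (fun (st : Int × Int) c =>
          let balance := if c = '[' then st.2 - 1 else if c = ']' then st.2 + 1 else st.2
          if balance > 0 then (st.1 + 1, balance - 2) else (st.1, balance)) (sw, b)).1 - 1) := by
  induction l generalizing sw b d p with
  | nil =>
    simp only [List.scanl_nil, List.foldl_cons, List.foldl_nil]
    omega
  | cons c tl ih =>
    simp only [List.scanl_cons, List.foldl_cons]
    rcases eq_or_ne c '[' with hc1 | hc1
    · subst hc1
      simp only [reduceIte, Char.reduceEq]
      split_ifs with g <;>
        exact ih _ _ _ _ (by omega) (by omega)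
    · rcases eq_or_ne c ']' with hc2 | hc2
      · subst hc2
        simp only [reduceIte, Char.reduceEq]
        split_ifs with g <;>
          exact ih _ _ _ _ (by omega) (by omega)
      · simp only [if_neg hc1, if_neg hc2]
        split_ifs with g <;>
          exact ih _ _ _ _ (by omega) (by omega)

-- ===== VERDICT (by name: the statement is the Claim_ definition above) =====
theorem min_swaps_spec : Claim_equal_min_swaps := by
  intro s _
  unfold Spec_min_swaps min_swaps min_swaps_alt
  have h := fold_inv s.toList 0 0 0 0 (by ring) (by omega)
  cases hl : s.toList with
  | nil => simp [PySem.List.max?, PySem.Int.floordiv]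
  | cons c tl =>
    rw [hl] at h
    simp only [List.scanl_cons, PySem.List.max?_id_cons]
    rw [List.scanl_cons, List.foldl_cons] at h
    simp only [max_self] at h
    rcases h with h | h <;>
      rw [h, PySem.Int.floordiv_eq_ediv_of_pos (by omega)] <;> omega
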